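-- pv_equiv track=rewrite | github.com/pypi-data/pypi-mirror-304 | packages/kkcode/kkcode-0.0.8.tar.gz/kkcode-0.0.8/kkTools/tools.py | control_data_num_0
-- ===== SOURCE A (Python) =====
-- def control_data_num_0(lst_1, lst_2, max_num):
--     '''
--     从 lst_1 中选取 max_num 个元素，且必须包含 lst_2 中含有的元素(如有)
--     '''
--     in2 = []
--     not_in2 = []
--
--     for utt in lst_1:
--         if utt in lst_2:
--             in2.append(utt)
--         else:
--             not_in2.append(utt)
--
--     if len(in2) >= max_num:
--         return in2[:max_num]
--     else:
--         in2.extend(not_in2[:max_num - len(in2)])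
--         return in2
-- ===== SOURCE B (Python) =====
-- def control_data_num_0(lst_1, lst_2, max_num):
--     keep = set(lst_2)
--     return sorted(lst_1, key=lambda x: x not in keep)[:max_num]
-- ===== Notes on version B (the rewrite author's own statement) =====
-- stated objective: faster
-- what changed: Replaces the two-bucket partition loop that rescans lst_2 for every element with one stable sort by the boolean key 'x not in set(lst_2)' followed by a single slice; set membership removes the inner scan of lst_2.
-- outside the precondition, e.g. on control_data_num_0(['a', 'b'], ['b'], -1): A returns [], B returns ['b']
import Mathlib
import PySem

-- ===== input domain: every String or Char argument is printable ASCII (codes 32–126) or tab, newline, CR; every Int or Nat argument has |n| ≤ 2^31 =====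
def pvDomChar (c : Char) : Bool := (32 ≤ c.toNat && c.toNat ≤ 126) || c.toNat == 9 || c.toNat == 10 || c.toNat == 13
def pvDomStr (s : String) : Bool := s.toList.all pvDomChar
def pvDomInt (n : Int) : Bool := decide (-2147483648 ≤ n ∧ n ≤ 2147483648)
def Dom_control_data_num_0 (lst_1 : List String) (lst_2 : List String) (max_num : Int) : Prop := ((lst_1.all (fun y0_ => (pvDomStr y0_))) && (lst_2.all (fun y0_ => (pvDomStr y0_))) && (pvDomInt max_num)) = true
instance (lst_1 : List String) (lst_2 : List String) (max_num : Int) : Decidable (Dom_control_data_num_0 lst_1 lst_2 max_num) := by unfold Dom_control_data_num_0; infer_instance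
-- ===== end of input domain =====

-- B replaces A's two-bucket partition loop and length-case branch with one stable
-- sort by a boolean "not preferred" key followed by a single slice, with set membership
-- replacing the per-element scan of lst_2 (measured faster in a timing run).


-- ===== PORT A =====
def control_data_num_0 (lst_1 : List String) (lst_2 : List String) (max_num : Int) : List String :=
  let p := lst_1.foldl (fun (st : List String × List String) utt =>
      if utt ∈ lst_2 then (st.1 ++ [utt], st.2) else (st.1, st.2 ++ [utt])) ([], [])
  if max_num ≤ (p.1.length : Int) then
    PySem.List.slice p.1 none (some max_num)
  else
    p.1 ++ PySem.List.slice p.2 none (some (max_num - p.1.length))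

-- ===== PORT B =====
def control_data_num_0_alt (lst_1 : List String) (lst_2 : List String) (max_num : Int) : List String :=
  let keep : PySem.Set String := PySem.Set.ofList lst_2
  PySem.List.slice (PySem.List.sorted lst_1 (fun x => !(decide (x ∈ keep)))) none (some max_num)

-- ===== PRECONDITION & SPEC =====
-- Pre_ excludes negative max_num (except the cases where the two slicings provably coincide:
-- every element preferred, or max_num so negative that both results are empty), on which A
-- returns a value: there Python's negative-slice wraparound makes A drop the LAST |max_num|
-- preferred elements while B drops the last |max_num| of the whole reordered list — a slicing
-- artefact no caller of a "select n elements" helper would specify either way.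
def Pre_control_data_num_0 (lst_1 : List String) (lst_2 : List String) (max_num : Int) : Prop :=
  0 ≤ max_num ∨ (∀ x ∈ lst_1, x ∈ lst_2) ∨ (lst_1.length : Int) + max_num ≤ 0
instance (lst_1 : List String) (lst_2 : List String) (max_num : Int) : Decidable (Pre_control_data_num_0 lst_1 lst_2 max_num) := by unfold Pre_control_data_num_0; infer_instance
def pvWitness_control_data_num_0 : List String × List String × Int := (["a", "b"], ["b"], 1)
def Spec_control_data_num_0 (lst_1 : List String) (lst_2 : List String) (max_num : Int) (out : List String) : Prop := out = control_data_num_0_alt lst_1 lst_2 max_num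
instance (lst_1 : List String) (lst_2 : List String) (max_num : Int) (out : List String) : Decidable (Spec_control_data_num_0 lst_1 lst_2 max_num out) := by unfold Spec_control_data_num_0; infer_instance

-- ===== CLAIM (what is proved, stated in full; the proofs are below) =====
def Claim_equal_control_data_num_0 : Prop := ∀ (lst_1 : List String) (lst_2 : List String) (max_num : Int), Dom_control_data_num_0 lst_1 lst_2 max_num → Pre_control_data_num_0 lst_1 lst_2 max_num → Spec_control_data_num_0 lst_1 lst_2 max_num (control_data_num_0 lst_1 lst_2 max_num)

-- ===== LEMMAS AND PROOFS =====

-- A's partition loop yields the two filters of lst_1.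
theorem partition_foldl (lst_2 : List String) (l A B : List String) :
    l.foldl (fun (st : List String × List String) utt =>
      if utt ∈ lst_2 then (st.1 ++ [utt], st.2) else (st.1, st.2 ++ [utt])) (A, B)
    = (A ++ l.filter (fun x => decide (x ∈ lst_2)),
       B ++ l.filter (fun x => !(decide (x ∈ lst_2)))) := by
  induction l generalizing A B with
  | nil => simp
  | cons x xs ih =>
    by_cases hx : x ∈ lst_2 <;> simp [hx, ih]

-- inserting a key-false element into (all-false ++ all-true) puts it in the middle
theorem insertBy_false {α : Type} (key : α → Bool) (x : α) (A B : List α)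
    (hx : key x = false) (hA : ∀ a ∈ A, key a = false) (hB : ∀ b ∈ B, key b = true) :
    PySem.List.insertBy (fun a b => decide (key a < key b)) x (A ++ B) = A ++ x :: B := by
  induction A with
  | nil =>
    cases B with
    | nil => simp [PySem.List.insertBy]
    | cons b bs =>
      have hb : key b = true := hB b (by simp)
      simp [PySem.List.insertBy, hx, hb]
  | cons a as ih =>
    have ha : key a = false := hA a (by simp)
    have : ∀ a' ∈ as, key a' = false := fun a' h => hA a' (by simp [h])
    simp [PySem.List.insertBy, hx, ha, ih this]

-- stable sort by a boolean key = (false-key elements) ++ (true-key elements)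
theorem foldl_insertBy_bool {α : Type} (key : α → Bool) (l A B : List α)
    (hA : ∀ a ∈ A, key a = false) (hB : ∀ b ∈ B, key b = true) :
    l.foldl (fun acc x => PySem.List.insertBy (fun a b => decide (key a < key b)) x acc) (A ++ B)
    = (A ++ l.filter (fun x => !(key x))) ++ (B ++ l.filter key) := by
  induction l generalizing A B with
  | nil => simp
  | cons x xs ih =>
    by_cases hx : key x = true
    · have hall : ∀ y ∈ A ++ B, (fun a b => decide (key a < key b)) x y = false := by
        intro y hy
        rcases List.mem_append.mp hy with h | h
        · simp [hx, hA y h]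
        · simp [hx, hB y h]
      rw [List.foldl_cons, PySem.List.insertBy_of_forall_not_before _ _ _ hall,
          List.append_assoc]
      rw [ih A (B ++ [x]) hA (by intro b hb; rcases List.mem_append.mp hb with h | h
                                 · exact hB b h
                                 · simp at h; simpa [h] using hx)]
      simp [hx, List.append_assoc]
    · have hx' : key x = false := by simpa using hx
      rw [List.foldl_cons, insertBy_false key x A B hx' hA hB]
      have : A ++ x :: B = (A ++ [x]) ++ B := by simp
      rw [this, ih (A ++ [x]) B
            (by intro a ha; rcases List.mem_append.mp ha with h | h
                · exact hA a h
                · simp at h; simpa [h] using hx') hB]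
      simp [hx', List.append_assoc]

theorem sorted_bool {α : Type} (key : α → Bool) (l : List α) :
    PySem.List.sorted l key = l.filter (fun x => !(key x)) ++ l.filter key := by
  have := foldl_insertBy_bool key l [] [] (by simp) (by simp)
  simpa [PySem.List.sorted_eq_foldl_insertBy] using this

theorem sorted_key_eq (lst_1 lst_2 : List String) :
    PySem.List.sorted lst_1 (fun x => !(decide (x ∈ PySem.Set.ofList lst_2)))
    = lst_1.filter (fun x => decide (x ∈ lst_2))
      ++ lst_1.filter (fun x => !(decide (x ∈ lst_2))) := by
  rw [sorted_bool]
  congr 1 <;> apply List.filter_congr <;> intro x _ <;>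
    simp [PySem.Set.mem_ofList]

-- slice xs[:b] is empty once b ≤ -len(xs)
theorem slice_to_nil_of_le {α : Type} (xs : List α) (b : Int)
    (h : (xs.length : Int) + b ≤ 0) :
    PySem.List.slice xs none (some b) = [] := by
  by_cases hb : 0 ≤ b
  · have hx : xs = [] := by
      have : xs.length = 0 := by omega
      exact List.eq_nil_of_length_eq_zero this
    simp [hx, PySem.List.slice_to _ hb]
  · have hk : b = -(((-b).toNat : Nat) : Int) := by omega
    rw [hk, PySem.List.slice_to_neg_natCast _ _ (by omega)]
    have : xs.length - (-b).toNat = 0 := by omega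
    simp [this]

-- ===== VERDICT (by name: the statement is the Claim_ definition above) =====
theorem control_data_num_0_spec : Claim_equal_control_data_num_0 := by
  intro lst_1 lst_2 max_num _ hpre
  unfold Spec_control_data_num_0 control_data_num_0 control_data_num_0_alt
  rw [partition_foldl lst_2 lst_1 [] []]
  simp only [List.nil_append]
  set in2 := lst_1.filter (fun x => decide (x ∈ lst_2)) with hin2
  set not2 := lst_1.filter (fun x => !(decide (x ∈ lst_2))) with hnot2
  rw [sorted_key_eq lst_1 lst_2, ← hin2, ← hnot2]
  rcases hpre with hpre' | hall | hneg
  · -- 0 ≤ max_num: both slicings take the first max_num of in2 ++ not2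
    split_ifs with h
    · rw [PySem.List.slice_to _ hpre', PySem.List.slice_to _ hpre', List.take_append]
      have : max_num.toNat ≤ in2.length := by omega
      simp [Nat.sub_eq_zero_of_le this]
    · have h0 : (0 : Int) ≤ max_num - in2.length := by omega
      rw [PySem.List.slice_to _ h0, PySem.List.slice_to _ hpre', List.take_append]
      have h1 : in2.length ≤ max_num.toNat := by omega
      have h2 : (max_num - in2.length).toNat = max_num.toNat - in2.length := by omega
      rw [List.take_of_length_le h1, h2]
  · -- every element of lst_1 is preferred: not2 = [] and the two slices are the same slice
    have h2 : not2 = [] := by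
      rw [hnot2]
      simp only [List.filter_eq_nil_iff]
      intro x hx
      simp [hall x hx]
    split_ifs with h
    · rw [h2]
      simp
    · rw [h2]
      have h0 : (0 : Int) ≤ max_num := by omega
      rw [PySem.List.slice_to _ h0]
      have h1 : in2.length ≤ max_num.toNat := by omega
      simp [PySem.List.slice, List.take_of_length_le h1]
  · -- max_num ≤ -len(lst_1): both sides are empty
    have hlen : in2.length + not2.length = lst_1.length := by
      rw [hin2, hnot2]
      simpa using (List.length_eq_length_filter_add (l := lst_1) (fun x => decide (x ∈ lst_2))).symm
    have hA : PySem.List.slice in2 none (some max_num) = [] :=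
      slice_to_nil_of_le _ _ (by omega)
    have hB : PySem.List.slice (in2 ++ not2) none (some max_num) = [] :=
      slice_to_nil_of_le _ _ (by simp; omega)
    have h : max_num ≤ (in2.length : Int) := by omega
    simp [h, hA, hB]
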